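-- pv_equiv track=rewrite | github.com/SherryYao/CIS530_project | extension1.py | check_repeated_vowel
-- ===== SOURCE A (Python) =====
-- def check_repeated_vowel(word):
--     repeated = 0
--     for idx, char in enumerate(word):
--         if char in "aeiouAEIOU":
--             if idx > 0 and char == word[idx - 1]:
--                 repeated += 1
--         else:
--             if repeated >= 2:
--                 return True
--             repeated = 0
--     return repeated >= 2
-- ===== SOURCE B (Python) =====
-- def check_repeated_vowel(word):
--     # Two-phase: collect maximal vowel runs, then judge each run
--     # by counting adjacent equal pairs.
--     runs = []
--     cur = ""
--     for ch in word:
--         if ch in "aeiouAEIOU":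
--             cur += ch
--         else:
--             if cur:
--                 runs.append(cur)
--             cur = ""
--     if cur:
--         runs.append(cur)
--     return any(sum(1 for a, b in zip(r, r[1:]) if a == b) >= 2 for r in runs)
-- ===== Notes on version B (the rewrite author's own statement) =====
-- stated objective: simpler
-- what changed: B splits the word into maximal vowel runs first and then judges each run by counting adjacent equal pairs, replacing A's single indexed scan with early return and a reset counter.
import Mathlib
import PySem

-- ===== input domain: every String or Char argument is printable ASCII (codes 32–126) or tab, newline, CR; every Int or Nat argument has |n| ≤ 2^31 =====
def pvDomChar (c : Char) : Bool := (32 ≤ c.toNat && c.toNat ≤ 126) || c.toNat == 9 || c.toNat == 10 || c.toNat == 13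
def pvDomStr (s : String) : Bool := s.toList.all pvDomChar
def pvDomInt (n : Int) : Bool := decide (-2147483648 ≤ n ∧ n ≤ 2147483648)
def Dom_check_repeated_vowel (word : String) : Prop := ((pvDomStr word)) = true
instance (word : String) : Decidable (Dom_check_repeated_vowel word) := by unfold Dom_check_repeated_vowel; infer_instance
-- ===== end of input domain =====

-- B replaces A's single indexed scan (reset counter, early return) by a two-phase
-- decomposition: extract the maximal vowel runs, then judge each run; objective: simpler.

-- ===== PORT A =====
-- 'char in "aeiouAEIOU"' (membership of a char in the string literal)
def pvIsVowel (c : Char) : Bool := ("aeiouAEIOU".toList).contains c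

-- A's for-loop with early return, over enumerate(word); 'word[idx - 1]' is Str.pyGet?
def pvGoA (word : String) : List (Int × Char) → Int → Bool
  | [], repeated => decide (repeated ≥ 2)
  | (idx, c) :: rest, repeated =>
    if pvIsVowel c then
      if idx > 0 && (PySem.Str.pyGet? word (idx - 1) == some c) then
        pvGoA word rest (repeated + 1)
      else
        pvGoA word rest repeated
    else
      if repeated ≥ 2 then true else pvGoA word rest 0

def check_repeated_vowel (word : String) : Bool :=
  pvGoA word (PySem.List.enumerate word.toList) 0

-- ===== PORT B =====
-- sum(1 for a, b in zip(r, r[1:]) if a == b)   (r[1:] is drop 1, cf. slice_from_one)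
def pvPairCount (r : List Char) : Int :=
  (r.zip (r.drop 1)).foldl (fun acc p => if p.1 = p.2 then acc + 1 else acc) 0

-- the grouping loop of Source B as a fold over the characters (runs so far, current run)
def pvGroupStep (st : List (List Char) × List Char) (ch : Char) : List (List Char) × List Char :=
  if pvIsVowel ch then (st.1, st.2 ++ [ch])
  else (if st.2 ≠ [] then st.1 ++ [st.2] else st.1, [])

def check_repeated_vowel_alt (word : String) : Bool :=
  let st := word.toList.foldl pvGroupStep ([], [])
  let runs := if st.2 ≠ [] then st.1 ++ [st.2] else st.1
  runs.any (fun r => decide (pvPairCount r ≥ 2))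

-- ===== PRECONDITION & SPEC =====
def Spec_check_repeated_vowel (word : String) (out : Bool) : Prop := out = check_repeated_vowel_alt word
instance (word : String) (out : Bool) : Decidable (Spec_check_repeated_vowel word out) := by unfold Spec_check_repeated_vowel; infer_instance

-- ===== CLAIM (what is proved, stated in full; the proofs are below) =====
def Claim_equal_check_repeated_vowel : Prop := ∀ (word : String), Dom_check_repeated_vowel word → Spec_check_repeated_vowel word (check_repeated_vowel word)

-- ===== LEMMAS AND PROOFS =====

-- number of adjacent equal pairs (the common reference for both sides)
def pvAdjC : List Char → Int
  | [] => 0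
  | [_] => 0
  | a :: b :: t => (if a = b then 1 else 0) + pvAdjC (b :: t)

-- canonical middle form: scan the remaining characters carrying the current vowel run
def pvBadFrom : List Char → List Char → Bool
  | [], cur => decide (pvAdjC cur ≥ 2)
  | c :: rest, cur =>
    if pvIsVowel c then pvBadFrom rest (cur ++ [c])
    else (decide (pvAdjC cur ≥ 2) || pvBadFrom rest [])

-- B's finishing step (append the trailing run, judge every run)
def pvFinish (st : List (List Char) × List Char) : Bool :=
  (if st.2 ≠ [] then st.1 ++ [st.2] else st.1).any (fun r => decide (pvPairCount r ≥ 2))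

theorem pvAdjC_append_singleton (cur : List Char) (c : Char) :
    pvAdjC (cur ++ [c]) = pvAdjC cur + (if cur.getLast? = some c then 1 else 0) := by
  induction cur with
  | nil => simp [pvAdjC]
  | cons a t ih =>
    cases t with
    | nil => by_cases h : a = c <;> simp [pvAdjC, h]
    | cons b t' =>
      simp only [List.cons_append, pvAdjC] at ih ⊢
      rw [ih, List.getLast?_cons_cons]
      ring

theorem pvPairCount_fold (r : List Char) (acc : Int) :
    (r.zip (r.drop 1)).foldl (fun acc p => if p.1 = p.2 then acc + 1 else acc) acc
      = acc + pvAdjC r := by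
  induction r generalizing acc with
  | nil => simp [pvAdjC]
  | cons a t ih =>
    cases t with
    | nil => simp [pvAdjC]
    | cons b t' =>
      simp only [show (a :: b :: t').drop 1 = b :: t' from rfl, List.zip_cons_cons,
        List.foldl_cons]
      rw [show (b :: t').zip t' = (b :: t').zip ((b :: t').drop 1) from rfl, ih]
      simp only [pvAdjC]
      split_ifs <;> ring

theorem pvPairCount_eq (r : List Char) : pvPairCount r = pvAdjC r := by
  simp only [pvPairCount]
  rw [pvPairCount_fold]
  ring

-- the grouping fold of B computes pvBadFrom
theorem pvGroup_eq (l : List Char) : ∀ (runs : List (List Char)) (cur : List Char),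
    pvFinish (l.foldl pvGroupStep (runs, cur))
      = (runs.any (fun r => decide (pvPairCount r ≥ 2)) || pvBadFrom l cur) := by
  induction l with
  | nil =>
    intro runs cur
    simp only [List.foldl_nil, pvFinish, pvBadFrom]
    by_cases h : cur = []
    · simp [h, pvAdjC, pvPairCount_eq]
    · simp [h, pvPairCount_eq]
  | cons c rest ih =>
    intro runs cur
    simp only [List.foldl_cons, pvGroupStep]
    cases hv : pvIsVowel c
    · simp only [Bool.false_eq_true, if_false]
      rw [ih]
      simp only [pvBadFrom, hv, Bool.false_eq_true, if_false]
      by_cases h : cur = []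
      · simp [h, pvAdjC, pvPairCount_eq]
      · simp [h, pvPairCount_eq, Bool.or_assoc]
    · simp only [if_true]
      rw [ih]
      simp only [pvBadFrom, hv, if_true]

theorem check_alt_eq (word : String) :
    check_repeated_vowel_alt word = pvBadFrom word.toList [] := by
  have h := pvGroup_eq word.toList [] []
  simpa [check_repeated_vowel_alt, pvFinish] using h

-- link between A's 'word[idx-1]' test and the current run's last character
def pvLink (pre cur : List Char) : Prop :=
  ∀ c : Char, pvIsVowel c = true → (pre.getLast? = some c ↔ cur.getLast? = some c)

theorem pvGet_last (pre rest : List Char) (h : pre ≠ []) :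
    PySem.Str.pyGet? (String.ofList (pre ++ rest)) ((pre.length : Int) - 1) = pre.getLast? := by
  have hp : 0 < pre.length := List.length_pos_iff.mpr h
  have h1 : ((pre.length : Int) - 1) = ((pre.length - 1 : Nat) : Int) := by omega
  have h2 : PySem.Str.pyGet? (String.ofList (pre ++ rest)) ((pre.length - 1 : Nat) : Int)
      = (pre ++ rest)[pre.length - 1]? := by simp
  rw [h1, h2, List.getElem?_append_left (by omega), List.getLast?_eq_getElem?]

-- main invariant: A's loop from state (pre consumed, repeated = pvAdjC cur) is pvBadFrom
theorem pvGoA_eq (rest : List Char) : ∀ (pre cur : List Char), pvLink pre cur →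
    pvGoA (String.ofList (pre ++ rest)) (PySem.List.enumerate rest (pre.length : Int)) (pvAdjC cur)
      = pvBadFrom rest cur := by
  induction rest with
  | nil => intro pre cur _; simp [pvGoA, pvBadFrom, PySem.List.enumerate_nil]
  | cons c rest ih =>
    intro pre cur hlink
    rw [PySem.List.enumerate_cons]
    have hw : pre ++ c :: rest = (pre ++ [c]) ++ rest := by simp
    have hlen : (((pre ++ [c]).length : Nat) : Int) = (pre.length : Int) + 1 := by simp
    cases hv : pvIsVowel c
    · -- non-vowel: flush the run
      have hlink' : pvLink (pre ++ [c]) [] := by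
        intro d hd
        rw [List.getLast?_concat]
        simp only [List.getLast?_nil]
        constructor
        · intro hcd
          injection hcd with hcd
          subst hcd
          exact absurd hd (by simp [hv])
        · intro hcd; cases hcd
      have ihx := ih (pre ++ [c]) [] hlink'
      rw [hlen, show pvAdjC ([] : List Char) = 0 from rfl] at ihx
      rw [hw]
      simp only [pvGoA, pvBadFrom, hv, Bool.false_eq_true, if_false]
      rw [ihx]
      split_ifs with hr <;> simp [hr]
    · -- vowel: extend the run
      have hlink' : pvLink (pre ++ [c]) (cur ++ [c]) := by
        intro d _
        rw [List.getLast?_concat, List.getLast?_concat]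
      have ihx := ih (pre ++ [c]) (cur ++ [c]) hlink'
      rw [hlen, pvAdjC_append_singleton] at ihx
      rw [hw]
      simp only [pvGoA, pvBadFrom, hv, if_true]
      by_cases hne : pre = []
      · have hc : ¬ cur.getLast? = some c := by
          intro hcl
          have := (hlink c hv).mpr hcl
          simp [hne] at this
        rw [if_neg hc, add_zero] at ihx
        rw [if_neg (by simp [hne])]
        exact ihx
      · have hg : PySem.List.pyGet? (pre ++ c :: rest) ((pre.length : Int) - 1)
            = pre.getLast? := by
          have hx := pvGet_last pre (c :: rest) hne
          simpa using hx
        have hlp : 0 < pre.length := List.length_pos_iff.mpr hne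
        by_cases hc : cur.getLast? = some c
        · have hp : pre.getLast? = some c := (hlink c hv).mpr hc
          rw [if_pos hc] at ihx
          rw [if_pos (show (decide ((pre.length : Int) > 0)
              && (PySem.Str.pyGet? (String.ofList ((pre ++ [c]) ++ rest))
                    ((pre.length : Int) - 1) == some c)) = true by simp [hg, hp, hlp])]
          exact ihx
        · have hp : ¬ pre.getLast? = some c := fun hpl => hc ((hlink c hv).mp hpl)
          rw [if_neg hc, add_zero] at ihx
          rw [if_neg (show ¬ (decide ((pre.length : Int) > 0)
              && (PySem.Str.pyGet? (String.ofList ((pre ++ [c]) ++ rest))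
                    ((pre.length : Int) - 1) == some c)) = true by simp [hg, hp])]
          exact ihx

theorem check_a_eq (word : String) :
    check_repeated_vowel word = pvBadFrom word.toList [] := by
  have h := pvGoA_eq word.toList [] [] (fun c _ => Iff.rfl)
  simpa [check_repeated_vowel, pvAdjC] using h

-- ===== VERDICT (by name: the statement is the Claim_ definition above) =====
theorem check_repeated_vowel_spec : Claim_equal_check_repeated_vowel := by
  intro word _
  unfold Spec_check_repeated_vowel
  rw [check_a_eq, check_alt_eq]
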